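-- pv_equiv track=rewrite | github.com/siedan17/aoc23 | day18/day18.py | fill_os
-- ===== SOURCE A (Python) =====
-- import copy
--
-- def count_os(list_to_print):
--     result = 0
--     for line in list_to_print:
--         for letter in line:
--             if letter == "O":
--                 result += 1
--     return result
--
-- def update_os(field):
--     for i in range(len(field)):
--         for j in range(len(field[0])):
--             if field[i][j] == ".":
--                 positions = []
--                 for m in [-1, 1]:
--                     for n in [-1, 1]:
--                         if i + m >= 0 and j + n >= 0:
--                             positions.append([i+m, j+n])
--
--                 o_counter = 0
--                 for pos in positions:
--                     try:
--                         if field[pos[0]][pos[1]] == "O":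
--                             o_counter += 1
--                     except:
--                         continue
--                 if o_counter >= 1:
--                     field[i][j] = "O"
--
-- def fill_os(field):
--     result = copy.deepcopy(field)
--     start_count = count_os(result)
--     update_os(result)
--     new_count = count_os(result)
--     while new_count > start_count:
--         start_count = copy.deepcopy(new_count)
--         update_os(result)
--         new_count = count_os(result)
--
--     return result
-- ===== SOURCE B (Python) =====
-- def fill_os(field):
--     if not field:
--         return []
--     h, w = len(field), len(field[0])
--     grid = [row[:] for row in field]
--     stack = [(i, j) for i, row in enumerate(grid) for j, c in enumerate(row) if c == "O"]
--     while stack: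
--         i, j = stack.pop()
--         for di in (-1, 1):
--             for dj in (-1, 1):
--                 ni, nj = i + di, j + dj
--                 if 0 <= ni < h and 0 <= nj < w and grid[ni][nj] == ".":
--                     grid[ni][nj] = "O"
--                     stack.append((ni, nj))
--     return grid
-- ===== Notes on version B (the rewrite author's own statement) =====
-- stated objective: faster
-- what changed: replaced A's repeat-full-grid-sweeps-until-the-O-count-stabilizes fixpoint iteration by a single DFS flood fill with an explicit stack seeded from the initial 'O' cells over diagonal adjacency
import Mathlib
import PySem

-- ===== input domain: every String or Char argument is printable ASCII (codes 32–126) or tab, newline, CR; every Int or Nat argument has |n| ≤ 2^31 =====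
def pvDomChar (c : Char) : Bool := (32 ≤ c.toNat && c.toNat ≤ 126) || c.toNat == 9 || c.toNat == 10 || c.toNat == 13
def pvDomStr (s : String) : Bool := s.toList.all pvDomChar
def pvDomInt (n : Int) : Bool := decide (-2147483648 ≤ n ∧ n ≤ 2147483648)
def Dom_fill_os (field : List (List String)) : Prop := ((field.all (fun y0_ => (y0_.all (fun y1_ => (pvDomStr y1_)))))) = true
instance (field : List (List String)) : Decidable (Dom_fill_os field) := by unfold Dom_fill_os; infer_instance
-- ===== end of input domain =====

-- B replaces A's repeated full-grid sweeps (until the O-count stops growing) by a single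
-- stack-based flood fill from the initial "O" cells over diagonal adjacency (each cell is
-- visited O(1) times instead of once per sweep; A deepcopies its argument and mutates only
-- the copy, and B likewise leaves its argument unchanged).

-- ===== PORT A =====
-- shared low-level grid access (field[i][j] read / write with nonnegative indices)
def cellG (g : List (List String)) (i j : Nat) : Option String :=
  (g[i]?).bind (fun r => r[j]?)

def setCellG (g : List (List String)) (i j : Nat) (v : String) : List (List String) :=
  g.modify i (fun r => r.set j v)

-- count_os
def countOs (g : List (List String)) : Nat :=
  g.foldl (fun acc line => line.foldl (fun a letter => if letter = "O" then a + 1 else a) acc) 0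

-- body of update_os for one (i, j): the 'positions' list, its 'O' count, and the conditional write
def positionsA (i j : Nat) : List (Int × Int) :=
  ([-1, 1] : List Int).foldl (fun ps m =>
    ([-1, 1] : List Int).foldl (fun ps' n =>
      if 0 ≤ (i : Int) + m ∧ 0 ≤ (j : Int) + n then ps' ++ [((i : Int) + m, (j : Int) + n)]
      else ps') ps) []

def oCounterA (g : List (List String)) (i j : Nat) : Nat :=
  (positionsA i j).foldl (fun c p =>
    if cellG g p.1.toNat p.2.toNat = some "O" then c + 1 else c) 0

def passCell (g : List (List String)) (i j : Nat) : List (List String) :=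
  if cellG g i j = some "." then
    if oCounterA g i j ≥ 1 then setCellG g i j "O" else g
  else g

-- update_os (in-place sequential sweep: i over len(field), j over len(field[0]))
def updateOs (g : List (List String)) : List (List String) :=
  (List.range g.length).foldl (fun g' i =>
    (List.range ((g'.headD []).length)).foldl (fun g'' j => passCell g'' i j) g') g

-- totalCells bounds the number of loop iterations: it is the fuel below (sufficiency is proved in the lemmas)
def totalCells (g : List (List String)) : Nat := (g.map List.length).sum

-- the 'while new_count > start_count' loop (fuel = totalCells + 1 is enough: each further
-- iteration strictly increases the O-count, which is bounded by totalCells)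
def fillLoop (fuel : Nat) (g : List (List String)) (startC : Nat) : List (List String) :=
  match fuel with
  | 0 => g
  | fuel + 1 => if countOs g > startC then fillLoop fuel (updateOs g) (countOs g) else g

def fill_os (field : List (List String)) : List (List String) :=
  let result := field                  -- copy.deepcopy(field): identity on immutable values
  let startCount := countOs result
  let result1 := updateOs result
  fillLoop (totalCells result + 1) result1 startCount

-- ===== PORT B =====
-- number of "." cells: with the stack length it bounds the pops left, the loop's fuel below
def dotsG (g : List (List String)) : Nat :=
  (g.map (fun r => r.countP (fun s => s == "."))).sum

-- one neighbour check of the inner 'for di … for dj …' body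
def bStep (h w i j : Int) (s : List (List String) × List (Int × Int)) (d : Int × Int) :
    List (List String) × List (Int × Int) :=
  if 0 ≤ i + d.1 ∧ i + d.1 < h ∧ 0 ≤ j + d.2 ∧ j + d.2 < w ∧
      cellG s.1 (i + d.1).toNat (j + d.2).toNat = some "." then
    (setCellG s.1 (i + d.1).toNat (j + d.2).toNat "O", (i + d.1, j + d.2) :: s.2)
  else s

-- the 'while stack' loop; the stack list is represented with its top (Python's list end) at the
-- HEAD; fuel = dots + stack length is enough (each pop spends one unit: proved in the lemmas)
def bfsLoop (fuel : Nat) (h w : Int) (g : List (List String)) (st : List (Int × Int)) :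
    List (List String) :=
  match fuel, st with
  | _, [] => g
  | 0, _ => g
  | fuel + 1, (i, j) :: rest =>
    let s := ([((-1 : Int), (-1 : Int)), (-1, 1), (1, -1), (1, 1)]).foldl (bStep h w i j) (g, rest)
    bfsLoop fuel h w s.1 s.2

-- the seed stack: all initially-"O" cells in scan order (top at head, so Python's .pop order is kept)
def seedsOf (g : List (List String)) : List (Int × Int) :=
  (PySem.List.enumerate g).foldl (fun st p =>
    (PySem.List.enumerate p.2).foldl (fun st' q =>
      if q.2 = "O" then (p.1, q.1) :: st' else st') st) []

def fill_os_alt (field : List (List String)) : List (List String) :=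
  match field with
  | [] => []
  | r0 :: _ =>
    let h := (field.length : Int)
    let w := (r0.length : Int)
    let grid := field                  -- [row[:] for row in field]: identity on immutable values
    let stack := seedsOf field
    bfsLoop (dotsG grid + stack.length) h w grid stack

-- ===== PRECONDITION & SPEC =====
-- Pre_ excludes exactly the fields on which the Python A raises IndexError: a nonempty field
-- with some row strictly shorter than the first row (A scans every row up to len(field[0])).
def Pre_fill_os (field : List (List String)) : Prop :=
  ∀ row ∈ field, (field.headD []).length ≤ row.length
instance (field : List (List String)) : Decidable (Pre_fill_os field) := by
  unfold Pre_fill_os; infer_instance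

def pvWitness_fill_os : List (List String) := [["O", "."], [".", "x"]]

def Spec_fill_os (field : List (List String)) (out : List (List String)) : Prop := out = fill_os_alt field
instance (field : List (List String)) (out : List (List String)) : Decidable (Spec_fill_os field out) := by unfold Spec_fill_os; infer_instance

-- ===== CLAIM (what is proved, stated in full; the proofs are below) =====
def Claim_equal_fill_os : Prop := ∀ (field : List (List String)), Dom_fill_os field → Pre_fill_os field → Spec_fill_os field (fill_os field)

-- ===== LEMMAS AND PROOFS =====

theorem map_length_setCellG (g : List (List String)) (i j : Nat) (v : String) :
    (setCellG g i j v).map List.length = g.map List.length := by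
  unfold setCellG
  induction g generalizing i with
  | nil => simp
  | cons r t ih =>
    cases i with
    | zero => simp [List.modify]
    | succ i => simpa [List.modify] using ih i

theorem map_length_passCell (g : List (List String)) (i j : Nat) :
    (passCell g i j).map List.length = g.map List.length := by
  unfold passCell
  split
  · split
    · exact map_length_setCellG g i j "O"
    · rfl
  · rfl

theorem map_length_foldl_passCell (l : List Nat) (f : List (List String) → Nat → List (List String))
    (hf : ∀ g x, (f g x).map List.length = g.map List.length) (g : List (List String)) :
    (l.foldl f g).map List.length = g.map List.length := by
  induction l generalizing g with
  | nil => rfl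
  | cons x t ih => rw [List.foldl_cons, ih, hf]

theorem map_length_updateOs (g : List (List String)) :
    (updateOs g).map List.length = g.map List.length := by
  unfold updateOs
  exact map_length_foldl_passCell _ _ (fun g' i =>
    map_length_foldl_passCell _ _ (fun g'' j => map_length_passCell g'' i j) g') g

theorem totalCells_updateOs (g : List (List String)) : totalCells (updateOs g) = totalCells g := by
  unfold totalCells; rw [map_length_updateOs]

theorem countOs_le_totalCells (g : List (List String)) : countOs g ≤ totalCells g := by
  unfold countOs totalCells
  suffices h : ∀ (rows : List (List String)) (acc : Nat),
      rows.foldl (fun acc line => line.foldl (fun a letter => if letter = "O" then a + 1 else a) acc) acc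
        ≤ acc + (rows.map List.length).sum by
    simpa using h g 0
  intro rows
  induction rows with
  | nil => simp
  | cons r t ih =>
    intro acc
    have hrow : ∀ (l : List String) (a : Nat),
        l.foldl (fun a letter => if letter = "O" then a + 1 else a) a ≤ a + l.length := by
      intro l
      induction l with
      | nil => simp
      | cons s ls ihl =>
        intro a; simp only [List.foldl_cons]
        split
        · exact le_trans (ihl _) (by simp; omega)
        · exact le_trans (ihl _) (by simp)
    calc t.foldl _ (r.foldl (fun a letter => if letter = "O" then a + 1 else a) acc)
        ≤ r.foldl (fun a letter => if letter = "O" then a + 1 else a) acc + (t.map List.length).sum := ih _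
      _ ≤ acc + r.length + (t.map List.length).sum := by
          have := hrow r acc; omega
      _ = acc + ((r :: t).map List.length).sum := by simp; omega

theorem countP_row_set_dot (r : List String) (j : Nat) (h : r[j]? = some ".") :
    (r.set j "O").countP (fun s => s == ".") + 1 = r.countP (fun s => s == ".") := by
  have hj : j < r.length := (List.getElem?_eq_some_iff.mp h).1
  have hval : r[j] = "." := by
    rw [List.getElem?_eq_getElem hj] at h
    exact Option.some.inj h
  have hpos : 0 < r.countP (fun s => s == ".") :=
    List.countP_pos_iff.mpr ⟨".", List.mem_of_getElem? h, by simp⟩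
  rw [List.countP_set hj]
  simp [hval]
  omega

theorem dotsG_setCellG_dot (g : List (List String)) (i j : Nat)
    (h : cellG g i j = some ".") : dotsG (setCellG g i j "O") + 1 = dotsG g := by
  unfold dotsG setCellG
  induction g generalizing i with
  | nil => simp [cellG] at h
  | cons r t ih =>
    cases i with
    | zero =>
      have h' : r[j]? = some "." := h
      have hrow := countP_row_set_dot r j h'
      simp [List.modify]
      omega
    | succ i =>
      have h' : cellG t i j = some "." := h
      have hrec := ih i h'
      simp [List.modify] at hrec ⊢
      omega

theorem bStep_measure (h w i j : Int) (s : List (List String) × List (Int × Int)) (d : Int × Int) :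
    dotsG (bStep h w i j s d).1 + (bStep h w i j s d).2.length = dotsG s.1 + s.2.length := by
  unfold bStep
  split
  · next hc =>
    have := dotsG_setCellG_dot s.1 (i + d.1).toNat (j + d.2).toNat hc.2.2.2.2
    simp; omega
  · rfl

theorem bfold_measure (h w i j : Int) (ds : List (Int × Int))
    (s : List (List String) × List (Int × Int)) :
    dotsG (ds.foldl (bStep h w i j) s).1 + (ds.foldl (bStep h w i j) s).2.length
      = dotsG s.1 + s.2.length := by
  induction ds generalizing s with
  | nil => rfl
  | cons d t ih => rw [List.foldl_cons, ih, bStep_measure]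

-- ---------- basic cell/set lemmas ----------
theorem cellG_cons_zero (r : List String) (t : List (List String)) (j : Nat) :
    cellG (r :: t) 0 j = r[j]? := rfl

theorem cellG_cons_succ (r : List String) (t : List (List String)) (i j : Nat) :
    cellG (r :: t) (i + 1) j = cellG t i j := rfl

theorem lt_of_cellG_some (g : List (List String)) (i j : Nat) (v : String)
    (h : cellG g i j = some v) : i < g.length := by
  unfold cellG at h
  cases hg : g[i]? with
  | none => rw [hg] at h; simp at h
  | some r => exact (List.getElem?_eq_some_iff.mp hg).1

theorem cellG_set_same (g : List (List String)) (i j : Nat) (v s : String)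
    (h : cellG g i j = some s) : cellG (setCellG g i j v) i j = some v := by
  unfold cellG setCellG at *
  cases hg : g[i]? with
  | none => rw [hg] at h; simp at h
  | some r =>
    rw [hg] at h
    simp only [Option.bind_some] at h
    have hj : j < r.length := (List.getElem?_eq_some_iff.mp h).1
    rw [List.getElem?_modify, hg]
    simp [List.getElem?_set_self hj]

theorem cellG_set_other (g : List (List String)) (i j : Nat) (v : String) (i' j' : Nat)
    (h : i' ≠ i ∨ j' ≠ j) : cellG (setCellG g i j v) i' j' = cellG g i' j' := by
  unfold cellG setCellG
  rw [List.getElem?_modify]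
  cases hg : g[i']? with
  | none => simp
  | some r =>
    simp only [Option.map_eq_map, Option.map_some, Option.bind_some]
    by_cases hi : i = i'
    · subst hi
      rcases h with h | h
      · omega
      · simp [List.getElem?_set_ne (by omega : j ≠ j')]
    · simp [hi]

theorem cellG_set_O_mono (g : List (List String)) (i j a b : Nat)
    (h : cellG g a b = some "O") : cellG (setCellG g i j "O") a b = some "O" := by
  by_cases hab : a = i ∧ b = j
  · obtain ⟨rfl, rfl⟩ := hab; exact cellG_set_same g a b "O" "O" h
  · rw [cellG_set_other g i j "O" a b (by tauto)]; exact h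

theorem cellG_set_O_dot (g : List (List String)) (i j a b : Nat)
    (h : cellG (setCellG g i j "O") a b = some ".") : cellG g a b = some "." := by
  by_cases hab : a = i ∧ b = j
  · obtain ⟨rfl, rfl⟩ := hab
    cases hc : cellG g a b with
    | none =>
      exfalso
      unfold cellG setCellG at h
      unfold cellG at hc
      rw [List.getElem?_modify] at h
      cases hg : g[a]? with
      | none => rw [hg] at h; simp at h
      | some r =>
        rw [hg] at h hc
        simp only [Option.map_eq_map, Option.map_some, Option.bind_some, if_pos rfl] at h hc
        have hblt : b < (r.set b "O").length := (List.getElem?_eq_some_iff.mp h).1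
        rw [List.length_set] at hblt
        exact absurd hc (by simp [List.getElem?_eq_none_iff]; omega)
    | some v => rw [cellG_set_same g a b "O" v hc] at h; simp at h
  · rw [cellG_set_other g i j "O" a b (by tauto)] at h; exact h

-- ---------- the diagonal-closure specification both programs compute ----------
def WG (field : List (List String)) : Nat := (field.headD []).length

def Adj (i j i' j' : Nat) : Prop := (i' = i + 1 ∨ i = i' + 1) ∧ (j' = j + 1 ∨ j = j' + 1)

theorem adj_symm (i j i' j' : Nat) (h : Adj i j i' j') : Adj i' j' i j := by
  unfold Adj at *; omega

inductive Reach (field : List (List String)) : Nat → Nat → Prop where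
  | seed (i j i' j' : Nat) : cellG field i j = some "." → j < WG field → Adj i j i' j' →
      cellG field i' j' = some "O" → Reach field i j
  | step (i j i' j' : Nat) : cellG field i j = some "." → j < WG field → Adj i j i' j' →
      Reach field i' j' → Reach field i j

def ShapeOf (field g : List (List String)) : Prop := g.map List.length = field.map List.length

def InvG (field g : List (List String)) : Prop :=
  ∀ i j, cellG g i j = cellG field i j ∨ (Reach field i j ∧ cellG g i j = some "O")

def ClosedG (field g : List (List String)) : Prop :=
  ∀ i j i' j', cellG g i j = some "." → j < WG field → Adj i j i' j' → cellG g i' j' ≠ some "O"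

theorem length_of_shape (field g : List (List String)) (h : ShapeOf field g) :
    g.length = field.length := by
  unfold ShapeOf at h
  have := congrArg List.length h
  simpa using this

theorem headD_length_of_shape (field g : List (List String)) (h : ShapeOf field g) :
    (g.headD []).length = WG field := by
  unfold ShapeOf at h
  unfold WG
  cases g with
  | nil => cases field with
    | nil => rfl
    | cons r t => simp at h
  | cons r t => cases field with
    | nil => simp at h
    | cons r' t' => simp at h; simp [h.1]

theorem grid_ext : ∀ (g g' : List (List String)), g.map List.length = g'.map List.length →
    (∀ i j, cellG g i j = cellG g' i j) → g = g' := by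
  intro g
  induction g with
  | nil => intro g' hl _; cases g' with
    | nil => rfl
    | cons r t => simp at hl
  | cons r t ih =>
    intro g' hl hc
    cases g' with
    | nil => simp at hl
    | cons r' t' =>
      simp only [List.map_cons, List.cons.injEq] at hl
      have hr : r = r' := by
        apply List.ext_getElem?
        intro j
        have := hc 0 j
        simpa [cellG_cons_zero] using this
      have ht : t = t' := ih t' hl.2 (fun i j => by
        have := hc (i + 1) j
        simpa [cellG_cons_succ] using this)
      rw [hr, ht]

theorem cell_of_reach (field g : List (List String)) (hInv : InvG field g)
    (hCl : ClosedG field g) (i j : Nat) (h : Reach field i j) : cellG g i j = some "O" := by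
  induction h with
  | seed i j i' j' hdot hjw hadj hO =>
    have hq : cellG g i' j' = some "O" := by
      rcases hInv i' j' with h1 | h1
      · rw [h1, hO]
      · exact h1.2
    rcases hInv i j with h1 | h1
    · exact absurd hq (hCl i j i' j' (h1.trans hdot) hjw hadj)
    · exact h1.2
  | step i j i' j' hdot hjw hadj _ ihq =>
    rcases hInv i j with h1 | h1
    · exact absurd ihq (hCl i j i' j' (h1.trans hdot) hjw hadj)
    · exact h1.2

theorem final_eq (field g g' : List (List String))
    (hs : ShapeOf field g) (hs' : ShapeOf field g')
    (hi : InvG field g) (hi' : InvG field g')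
    (hc : ClosedG field g) (hc' : ClosedG field g') : g = g' := by
  apply grid_ext g g' (by unfold ShapeOf at hs hs'; rw [hs, hs'])
  intro i j
  by_cases hr : Reach field i j
  · rw [cell_of_reach field g hi hc i j hr, cell_of_reach field g' hi' hc' i j hr]
  · rcases hi i j with h1 | h1
    · rcases hi' i j with h2 | h2
      · rw [h1, h2]
      · exact absurd h2.1 hr
    · exact absurd h1.1 hr

-- ---------- A-side: positions and counter ----------
theorem positionsA_eq (i j : Nat) :
    positionsA i j =
      (([-1, 1] : List Int).filter (fun n => decide (0 ≤ (i : Int) + -1 ∧ 0 ≤ (j : Int) + n))).map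
          (fun n => ((i : Int) + -1, (j : Int) + n)) ++
        (([-1, 1] : List Int).filter (fun n => decide (0 ≤ (i : Int) + 1 ∧ 0 ≤ (j : Int) + n))).map
          (fun n => ((i : Int) + 1, (j : Int) + n)) := by
  unfold positionsA
  rw [List.foldl_cons, List.foldl_cons, List.foldl_nil,
    PySem.List.foldl_append_ite (p := fun n => 0 ≤ (i : Int) + -1 ∧ 0 ≤ (j : Int) + n)
      (f := fun n => ((i : Int) + -1, (j : Int) + n)),
    PySem.List.foldl_append_ite (p := fun n => 0 ≤ (i : Int) + 1 ∧ 0 ≤ (j : Int) + n)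
      (f := fun n => ((i : Int) + 1, (j : Int) + n))]
  simp

theorem mem_positionsA (i j : Nat) (p : Int × Int) :
    p ∈ positionsA i j ↔
      ∃ m ∈ ([-1, 1] : List Int), ∃ n ∈ ([-1, 1] : List Int),
        (0 ≤ (i : Int) + m ∧ 0 ≤ (j : Int) + n) ∧ p = ((i : Int) + m, (j : Int) + n) := by
  rw [positionsA_eq]
  simp only [List.mem_append, List.mem_map, List.mem_filter]
  constructor
  · rintro (⟨n, hn, rfl⟩ | ⟨n, hn, rfl⟩)
    · exact ⟨-1, by simp, n, hn.1, by simpa using hn.2, rfl⟩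
    · exact ⟨1, by simp, n, hn.1, by simpa using hn.2, rfl⟩
  · rintro ⟨m, hm, n, hn, hc, rfl⟩
    rcases (by simpa using hm : m = -1 ∨ m = 1) with rfl | rfl
    · exact Or.inl ⟨n, ⟨hn, by simpa using hc⟩, rfl⟩
    · exact Or.inr ⟨n, ⟨hn, by simpa using hc⟩, rfl⟩

theorem mem_positionsA_elim (i j : Nat) (p : Int × Int) (hp : p ∈ positionsA i j) :
    ∃ a b : Nat, p = ((a : Int), (b : Int)) ∧ Adj i j a b := by
  rw [mem_positionsA] at hp
  obtain ⟨m, hm, n, hn, hc, rfl⟩ := hp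
  have hm' : m = -1 ∨ m = 1 := by simpa using hm
  have hn' : n = -1 ∨ n = 1 := by simpa using hn
  refine ⟨((i : Int) + m).toNat, ((j : Int) + n).toNat, ?_, ?_⟩
  · simp [Prod.ext_iff]; omega
  · unfold Adj; omega

theorem mem_positionsA_intro (i j a b : Nat) (h : Adj i j a b) :
    ((a : Int), (b : Int)) ∈ positionsA i j := by
  rw [mem_positionsA]
  unfold Adj at h
  refine ⟨(a : Int) - (i : Int), by simp; omega, (b : Int) - (j : Int), by simp; omega,
    ⟨by omega, by omega⟩, ?_⟩
  simp [Prod.ext_iff]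

theorem foldl_count_exists {α : Type} (P : α → Prop) [DecidablePred P] :
    ∀ (l : List α) (acc : Nat),
      acc < l.foldl (fun c x => if P x then c + 1 else c) acc → ∃ x ∈ l, P x := by
  intro l
  induction l with
  | nil => intro acc h; simp at h
  | cons y t ih =>
    intro acc h
    by_cases hy : P y
    · exact ⟨y, by simp, hy⟩
    · rw [List.foldl_cons, if_neg hy] at h
      obtain ⟨x, hx, hPx⟩ := ih acc h
      exact ⟨x, by simp [hx], hPx⟩

theorem foldl_count_mono {α : Type} (P : α → Prop) [DecidablePred P] :
    ∀ (l : List α) (acc : Nat), acc ≤ l.foldl (fun c x => if P x then c + 1 else c) acc := by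
  intro l
  induction l with
  | nil => intro acc; simp
  | cons y t ih =>
    intro acc
    rw [List.foldl_cons]
    split
    · exact le_trans (by omega) (ih (acc + 1))
    · exact ih acc

theorem foldl_count_pos {α : Type} (P : α → Prop) [DecidablePred P] :
    ∀ (l : List α) (acc : Nat) (x : α), x ∈ l → P x →
      acc < l.foldl (fun c x => if P x then c + 1 else c) acc := by
  intro l
  induction l with
  | nil => intro acc x hx; simp at hx
  | cons y t ih =>
    intro acc x hx hPx
    rw [List.foldl_cons]
    rcases List.mem_cons.mp hx with rfl | hx'
    · rw [if_pos hPx]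
      exact lt_of_lt_of_le (by omega) (foldl_count_mono P t (acc + 1))
    · split
      · exact lt_of_lt_of_le (by omega) (le_of_lt (ih (acc + 1) x hx' hPx))
      · exact ih acc x hx' hPx

theorem oCounterA_exists (g : List (List String)) (i j : Nat) (h : 1 ≤ oCounterA g i j) :
    ∃ p ∈ positionsA i j, cellG g p.1.toNat p.2.toNat = some "O" := by
  unfold oCounterA at h
  exact foldl_count_exists (fun p => cellG g p.1.toNat p.2.toNat = some "O")
    (positionsA i j) 0 (Nat.lt_of_lt_of_le Nat.zero_lt_one h)

theorem oCounterA_pos (g : List (List String)) (i j : Nat) (p : Int × Int)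
    (hp : p ∈ positionsA i j) (hO : cellG g p.1.toNat p.2.toNat = some "O") :
    1 ≤ oCounterA g i j := by
  unfold oCounterA
  exact foldl_count_pos (fun p => cellG g p.1.toNat p.2.toNat = some "O")
    (positionsA i j) 0 p hp hO

-- ---------- A-side: invariants ----------
def GoodA (field g : List (List String)) : Prop := ShapeOf field g ∧ InvG field g

theorem foldl_pres {α β : Type} (P : β → Prop) (f : β → α → β) :
    ∀ (l : List α) (b : β), P b → (∀ b x, P b → x ∈ l → P (f b x)) → P (l.foldl f b) := by
  intro l
  induction l with
  | nil => intro b hb _; exact hb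
  | cons x t ih =>
    intro b hb hstep
    exact ih (f b x) (hstep b x hb (by simp)) (fun b' y hb' hy => hstep b' y hb' (by simp [hy]))

theorem goodA_passCell (field g : List (List String)) (i j : Nat)
    (hg : GoodA field g) (hj : j < WG field) : GoodA field (passCell g i j) := by
  unfold passCell
  split
  · next hdot =>
    split
    · next hcnt =>
      obtain ⟨p, hpmem, hpO⟩ := oCounterA_exists g i j hcnt
      obtain ⟨a, b, rfl, hadj⟩ := mem_positionsA_elim i j p hpmem
      simp only [Int.toNat_natCast] at hpO
      have hfdot : cellG field i j = some "." := by
        rcases hg.2 i j with h1 | h1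
        · exact h1.symm.trans hdot
        · rw [h1.2] at hdot; simp at hdot
      have hreach : Reach field i j := by
        rcases hg.2 a b with h1 | h1
        · exact Reach.seed i j a b hfdot hj hadj (h1.symm.trans hpO)
        · exact Reach.step i j a b hfdot hj hadj h1.1
      refine ⟨(map_length_setCellG g i j "O").trans hg.1, ?_⟩
      intro x y
      by_cases hxy : x = i ∧ y = j
      · obtain ⟨rfl, rfl⟩ := hxy
        exact Or.inr ⟨hreach, cellG_set_same g x y "O" "." hdot⟩
      · rw [cellG_set_other g i j "O" x y (by tauto)]
        exact hg.2 x y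
    · exact hg
  · exact hg

theorem goodA_updateOs (field g : List (List String)) (hg : GoodA field g) :
    GoodA field (updateOs g) := by
  unfold updateOs
  apply foldl_pres (GoodA field) _ _ g hg
  intro g' i hg' _
  apply foldl_pres (GoodA field) _ _ g' hg'
  intro g'' j hg'' hjmem
  have hj : j < WG field := by
    rw [List.mem_range] at hjmem
    rwa [headD_length_of_shape field g' hg'.1] at hjmem
  exact goodA_passCell field g'' i j hg'' hj

-- ---------- the pointwise order and the counting argument ----------
def LeG (g g' : List (List String)) : Prop :=
  g'.map List.length = g.map List.length ∧
  ∀ i j, cellG g' i j = cellG g i j ∨ (cellG g i j = some "." ∧ cellG g' i j = some "O")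

theorem leG_refl (g : List (List String)) : LeG g g := ⟨rfl, fun _ _ => Or.inl rfl⟩

theorem leG_trans (g1 g2 g3 : List (List String)) (h12 : LeG g1 g2) (h23 : LeG g2 g3) :
    LeG g1 g3 := by
  refine ⟨h23.1.trans h12.1, fun i j => ?_⟩
  rcases h23.2 i j with h3 | h3
  · rcases h12.2 i j with h2 | h2
    · exact Or.inl (h3.trans h2)
    · exact Or.inr ⟨h2.1, h3.trans h2.2⟩
  · rcases h12.2 i j with h2 | h2
    · exact Or.inr ⟨h2.symm.trans h3.1, h3.2⟩
    · exfalso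
      rw [h2.2] at h3
      exact absurd h3.1 (by simp)

theorem leG_antisymm (g g' : List (List String)) (h : LeG g g') (h' : LeG g' g) : g = g' := by
  apply grid_ext g g' h'.1
  intro i j
  rcases h.2 i j with h1 | h1
  · exact h1.symm
  · rcases h'.2 i j with h2 | h2
    · exact h2
    · exfalso
      rw [h1.2] at h2
      exact absurd h2.1 (by simp)

theorem leG_passCell (g : List (List String)) (i j : Nat) : LeG g (passCell g i j) := by
  unfold passCell
  split
  · next hdot =>
    split
    · refine ⟨map_length_setCellG g i j "O", fun a b => ?_⟩
      by_cases hab : a = i ∧ b = j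
      · obtain ⟨rfl, rfl⟩ := hab
        exact Or.inr ⟨hdot, cellG_set_same g a b "O" "." hdot⟩
      · exact Or.inl (cellG_set_other g i j "O" a b (by tauto))
    · exact leG_refl g
  · exact leG_refl g

theorem leG_foldl {α : Type} (f : List (List String) → α → List (List String))
    (hf : ∀ g x, LeG g (f g x)) :
    ∀ (l : List α) (g : List (List String)), LeG g (l.foldl f g) := by
  intro l
  induction l with
  | nil => intro g; exact leG_refl g
  | cons x t ih =>
    intro g
    exact leG_trans g (f g x) _ (hf g x) (ih (f g x))

theorem leG_updateOs (g : List (List String)) : LeG g (updateOs g) := by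
  unfold updateOs
  exact leG_foldl _ (fun g' i => leG_foldl _ (fun g'' j => leG_passCell g'' i j) _ g') _ g

theorem foldl_countO (l : List String) :
    ∀ acc : Nat, l.foldl (fun a letter => if letter = "O" then a + 1 else a) acc
      = acc + l.countP (fun s => s == "O") := by
  induction l with
  | nil => intro acc; simp
  | cons x t ih =>
    intro acc
    by_cases hx : x = "O" <;> simp [hx, List.countP_cons, ih] <;> omega

theorem countOs_eq (g : List (List String)) :
    countOs g = (g.map (fun r => r.countP (fun s => s == "O"))).sum := by
  unfold countOs
  suffices h : ∀ (rows : List (List String)) (acc : Nat),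
      rows.foldl (fun acc line => line.foldl (fun a letter => if letter = "O" then a + 1 else a) acc) acc
        = acc + (rows.map (fun r => r.countP (fun s => s == "O"))).sum by
    simpa using h g 0
  intro rows
  induction rows with
  | nil => intro acc; simp
  | cons r t ih =>
    intro acc
    rw [List.foldl_cons, ih, foldl_countO]
    simp; omega

theorem row_count_le : ∀ (r r' : List String), r.length = r'.length →
    (∀ j : Nat, r'[j]? = r[j]? ∨ (r[j]? = some "." ∧ r'[j]? = some "O")) →
    r.countP (fun s => s == "O") ≤ r'.countP (fun s => s == "O") ∧
      (r'.countP (fun s => s == "O") ≤ r.countP (fun s => s == "O") → r = r') := by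
  intro r
  induction r with
  | nil =>
    intro r' hlen _
    cases r' with
    | nil => exact ⟨le_refl _, fun _ => rfl⟩
    | cons a t => simp at hlen
  | cons a t ih =>
    intro r' hlen hpt
    cases r' with
    | nil => simp at hlen
    | cons a' t' =>
      have h0 := hpt 0
      simp only [List.getElem?_cons_zero] at h0
      have hpt' : ∀ j : Nat, t'[j]? = t[j]? ∨ (t[j]? = some "." ∧ t'[j]? = some "O") := by
        intro j
        have := hpt (j + 1)
        simpa using this
      have iht := ih t' (by simpa using hlen) hpt'
      rcases h0 with h0 | h0
      · have ha : a' = a := Option.some.inj h0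
        rw [ha]
        constructor
        · by_cases hA : a = "O" <;> simp [List.countP_cons, hA] <;> omega
        · intro hc
          have ht : t = t' := by
            apply iht.2
            by_cases hA : a = "O" <;> simp [List.countP_cons, hA] at hc <;> omega
          rw [ht]
      · have ha : a = "." := Option.some.inj h0.1
        have ha' : a' = "O" := Option.some.inj h0.2
        subst ha; subst ha'
        constructor
        · simp [List.countP_cons]; omega
        · intro hc
          exfalso
          simp [List.countP_cons] at hc
          omega

theorem leG_count (g g' : List (List String)) (h : LeG g g') :
    countOs g ≤ countOs g' ∧ (countOs g' ≤ countOs g → g = g') := by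
  obtain ⟨hshape, hpt⟩ := h
  induction g generalizing g' with
  | nil =>
    cases g' with
    | nil => exact ⟨le_refl _, fun _ => rfl⟩
    | cons r' t' => simp at hshape
  | cons r t ih =>
    cases g' with
    | nil => simp at hshape
    | cons r' t' =>
      simp only [List.map_cons, List.cons.injEq] at hshape
      have hrow := row_count_le r r' hshape.1.symm (fun j => by
        have := hpt 0 j
        simpa [cellG_cons_zero] using this)
      have iht := ih t' hshape.2 (fun i j => by
        have := hpt (i + 1) j
        simpa [cellG_cons_succ] using this)
      rw [countOs_eq, countOs_eq] at *
      simp only [List.map_cons, List.sum_cons]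
      constructor
      · omega
      · intro hc
        have h1 : r = r' := hrow.2 (by omega)
        have h2 : t = t' := iht.2 (by omega)
        rw [h1, h2]

theorem updateOs_fix_of_count (g : List (List String)) (h : countOs (updateOs g) ≤ countOs g) :
    updateOs g = g := by
  have := leG_count g (updateOs g) (leG_updateOs g)
  exact (this.2 h).symm

theorem foldl_fixed {α : Type} (f : List (List String) → α → List (List String))
    (hf : ∀ g x, LeG g (f g x)) :
    ∀ (l : List α) (g : List (List String)), l.foldl f g = g → ∀ x ∈ l, f g x = g := by
  intro l
  induction l with
  | nil => intro g _ x hx; simp at hx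
  | cons y t ih =>
    intro g hfold x hx
    simp only [List.foldl_cons] at hfold
    have le2 : LeG (f g y) (t.foldl f (f g y)) := leG_foldl f hf t (f g y)
    rw [hfold] at le2
    have hfy : f g y = g := (leG_antisymm g (f g y) (hf g y) le2).symm
    rcases List.mem_cons.mp hx with rfl | hx'
    · exact hfy
    · exact ih g (by rwa [hfy] at hfold) x hx'

theorem closed_of_fix (field g : List (List String)) (hs : ShapeOf field g)
    (hfix : updateOs g = g) : ClosedG field g := by
  intro i j i' j' hdot hjw hadj hO
  have hi : i < g.length := lt_of_cellG_some g i j "." hdot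
  have houter := foldl_fixed
    (fun g' i => (List.range ((g'.headD []).length)).foldl (fun g'' j => passCell g'' i j) g')
    (fun g' i => leG_foldl _ (fun g'' j => leG_passCell g'' i j) _ g')
    (List.range g.length) g hfix i (List.mem_range.mpr hi)
  have hinner := foldl_fixed (fun g'' j => passCell g'' i j)
    (fun g'' j => leG_passCell g'' i j)
    (List.range ((g.headD []).length)) g houter j
    (List.mem_range.mpr (by rwa [headD_length_of_shape field g hs]))
  -- passCell g i j = g although the cell is "." with an "O" diagonal neighbour: contradiction
  have hcnt : 1 ≤ oCounterA g i j :=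
    oCounterA_pos g i j ((i' : Int), (j' : Int)) (mem_positionsA_intro i j i' j' hadj)
      (by simpa using hO)
  have hinner2 : passCell g i j = g := hinner
  unfold passCell at hinner2
  rw [if_pos hdot, if_pos hcnt] at hinner2
  have : cellG g i j = some "O" := by
    rw [← hinner2]; exact cellG_set_same g i j "O" "." hdot
  rw [this] at hdot; simp at hdot

-- ---------- A-side: the while loop ----------
theorem fillLoop_props (field : List (List String)) :
    ∀ (fuel : Nat) (g : List (List String)) (s : Nat), GoodA field g →
      (∃ x, g = updateOs x ∧ s = countOs x) → totalCells g - s < fuel →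
      GoodA field (fillLoop fuel g s) ∧ ClosedG field (fillLoop fuel g s) := by
  intro fuel
  induction fuel with
  | zero => intro g s _ _ hlt; omega
  | succ fuel ih =>
    intro g s hg hex hlt
    rw [fillLoop]
    split
    · next hgt =>
      refine ih (updateOs g) (countOs g) (goodA_updateOs field g hg) ⟨g, rfl, rfl⟩ ?_
      have h1 := totalCells_updateOs g
      have h2 := countOs_le_totalCells g
      omega
    · next hle =>
      obtain ⟨x, rfl, rfl⟩ := hex
      have hfix : updateOs x = x := updateOs_fix_of_count x (by omega)
      rw [hfix] at hg ⊢
      exact ⟨hg, closed_of_fix field x hg.1 hfix⟩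

theorem fill_os_props (field : List (List String)) :
    GoodA field (fill_os field) ∧ ClosedG field (fill_os field) := by
  unfold fill_os
  refine fillLoop_props field (totalCells field + 1) (updateOs field) (countOs field)
    (goodA_updateOs field field ⟨rfl, fun _ _ => Or.inl rfl⟩) ⟨field, rfl, rfl⟩ ?_
  have h1 := totalCells_updateOs field
  omega

-- ---------- B-side: invariants ----------
def StackOK (g : List (List String)) (st : List (Int × Int)) : Prop :=
  ∀ p ∈ st, ∃ a b : Nat, p = ((a : Int), (b : Int)) ∧ cellG g a b = some "O"

def ProcessedAt (field g : List (List String)) (a b : Nat) : Prop :=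
  ∀ a' b', Adj a b a' b' → b' < WG field → cellG g a' b' ≠ some "."

def Progress (field g : List (List String)) (st : List (Int × Int)) : Prop :=
  ∀ a b : Nat, cellG g a b = some "O" → ((a : Int), (b : Int)) ∈ st ∨ ProcessedAt field g a b

def GoodB (field g : List (List String)) (st : List (Int × Int)) : Prop :=
  ShapeOf field g ∧ InvG field g ∧ StackOK g st ∧ Progress field g st

def ProgExc (field g : List (List String)) (st : List (Int × Int)) (i0 j0 : Nat) : Prop :=
  ∀ a b : Nat, cellG g a b = some "O" →
    ((a : Int), (b : Int)) ∈ st ∨ (a = i0 ∧ b = j0) ∨ ProcessedAt field g a b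

theorem bStep_inv (field : List (List String)) (i0 j0 : Nat) (d : Int × Int)
    (hd : (d.1 = -1 ∨ d.1 = 1) ∧ (d.2 = -1 ∨ d.2 = 1))
    (g : List (List String)) (st : List (Int × Int))
    (hsh : ShapeOf field g) (hinv : InvG field g) (hstk : StackOK g st)
    (hO : cellG g i0 j0 = some "O") (hpr : ProgExc field g st i0 j0) :
    (ShapeOf field (bStep (field.length : Int) (((WG field : Nat) : Int)) ((i0 : Int)) ((j0 : Int)) (g, st) d).1 ∧
     InvG field (bStep (field.length : Int) (((WG field : Nat) : Int)) ((i0 : Int)) ((j0 : Int)) (g, st) d).1 ∧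
     StackOK (bStep (field.length : Int) (((WG field : Nat) : Int)) ((i0 : Int)) ((j0 : Int)) (g, st) d).1
       (bStep (field.length : Int) (((WG field : Nat) : Int)) ((i0 : Int)) ((j0 : Int)) (g, st) d).2 ∧
     cellG (bStep (field.length : Int) (((WG field : Nat) : Int)) ((i0 : Int)) ((j0 : Int)) (g, st) d).1 i0 j0 = some "O" ∧
     ProgExc field (bStep (field.length : Int) (((WG field : Nat) : Int)) ((i0 : Int)) ((j0 : Int)) (g, st) d).1
       (bStep (field.length : Int) (((WG field : Nat) : Int)) ((i0 : Int)) ((j0 : Int)) (g, st) d).2 i0 j0) ∧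
    (∀ a b : Nat, cellG (bStep (field.length : Int) (((WG field : Nat) : Int)) ((i0 : Int)) ((j0 : Int)) (g, st) d).1 a b = some "." →
      cellG g a b = some ".") ∧
    (∀ q ∈ st, q ∈ (bStep (field.length : Int) (((WG field : Nat) : Int)) ((i0 : Int)) ((j0 : Int)) (g, st) d).2) ∧
    ((0 ≤ (i0 : Int) + d.1 ∧ (i0 : Int) + d.1 < (field.length : Int) ∧
        0 ≤ (j0 : Int) + d.2 ∧ (j0 : Int) + d.2 < ((WG field : Nat) : Int)) →
      cellG (bStep (field.length : Int) (((WG field : Nat) : Int)) ((i0 : Int)) ((j0 : Int)) (g, st) d).1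
        ((i0 : Int) + d.1).toNat ((j0 : Int) + d.2).toNat ≠ some ".") := by
  unfold bStep
  split
  · next hc =>
    obtain ⟨hc1, hc2, hc3, hc4, hc5⟩ := hc
    simp only at hc5 ⊢
    have hAi : ((((i0 : Int) + d.1).toNat : Nat) : Int) = (i0 : Int) + d.1 := Int.toNat_of_nonneg hc1
    have hBj : ((((j0 : Int) + d.2).toNat : Nat) : Int) = (j0 : Int) + d.2 := Int.toNat_of_nonneg hc3
    have hBW : ((j0 : Int) + d.2).toNat < WG field := by omega
    have hadj : Adj (((i0 : Int) + d.1).toNat) (((j0 : Int) + d.2).toNat) i0 j0 := by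
      unfold Adj; omega
    have hfd : cellG field (((i0 : Int) + d.1).toNat) (((j0 : Int) + d.2).toNat) = some "." := by
      rcases hinv (((i0 : Int) + d.1).toNat) (((j0 : Int) + d.2).toNat) with h1 | h1
      · exact h1.symm.trans hc5
      · rw [h1.2] at hc5; simp at hc5
    have hreach : Reach field (((i0 : Int) + d.1).toNat) (((j0 : Int) + d.2).toNat) := by
      rcases hinv i0 j0 with h1 | h1
      · exact Reach.seed _ _ i0 j0 hfd hBW hadj (h1.symm.trans hO)
      · exact Reach.step _ _ i0 j0 hfd hBW hadj h1.1
    refine ⟨⟨?_, ?_, ?_, ?_, ?_⟩, ?_, ?_, ?_⟩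
    · exact (map_length_setCellG g _ _ "O").trans hsh
    · intro x y
      by_cases hxy : x = ((i0 : Int) + d.1).toNat ∧ y = ((j0 : Int) + d.2).toNat
      · obtain ⟨rfl, rfl⟩ := hxy
        exact Or.inr ⟨hreach, cellG_set_same g _ _ "O" "." hc5⟩
      · rw [cellG_set_other g _ _ "O" x y (by tauto)]
        exact hinv x y
    · intro q hq
      rcases List.mem_cons.mp hq with rfl | hq'
      · refine ⟨((i0 : Int) + d.1).toNat, ((j0 : Int) + d.2).toNat, ?_, ?_⟩
        · simp [Prod.ext_iff, hAi, hBj]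
        · exact cellG_set_same g _ _ "O" "." hc5
      · obtain ⟨a, b, rfl, hab⟩ := hstk q hq'
        exact ⟨a, b, rfl, cellG_set_O_mono g _ _ a b hab⟩
    · exact cellG_set_O_mono g _ _ i0 j0 hO
    · intro x y hxy2
      by_cases hxy : x = ((i0 : Int) + d.1).toNat ∧ y = ((j0 : Int) + d.2).toNat
      · obtain ⟨rfl, rfl⟩ := hxy
        left
        rw [List.mem_cons]
        left
        simp [Prod.ext_iff, hAi, hBj]
      · have hxO : cellG g x y = some "O" := by
          rw [← cellG_set_other g _ _ "O" x y (by tauto)]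
          exact hxy2
        rcases hpr x y hxO with h1 | h1 | h1
        · exact Or.inl (List.mem_cons.mpr (Or.inr h1))
        · exact Or.inr (Or.inl h1)
        · refine Or.inr (Or.inr ?_)
          intro a' b' hadj' hW' hdot'
          exact h1 a' b' hadj' hW' (cellG_set_O_dot g _ _ a' b' hdot')
    · exact fun a b hab => cellG_set_O_dot g _ _ a b hab
    · exact fun q hq => List.mem_cons.mpr (Or.inr hq)
    · intro _
      rw [cellG_set_same g _ _ "O" "." hc5]
      simp
  · next hc =>
    refine ⟨⟨hsh, hinv, hstk, hO, hpr⟩, fun a b hab => hab, fun q hq => hq, ?_⟩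
    intro hrange hdot
    exact hc ⟨hrange.1, hrange.2.1, hrange.2.2.1, hrange.2.2.2, hdot⟩

theorem bfold_inv (field : List (List String)) (i0 j0 : Nat) :
    ∀ (ds : List (Int × Int)), (∀ d ∈ ds, (d.1 = -1 ∨ d.1 = 1) ∧ (d.2 = -1 ∨ d.2 = 1)) →
    ∀ (g : List (List String)) (st : List (Int × Int)),
      ShapeOf field g → InvG field g → StackOK g st →
      cellG g i0 j0 = some "O" → ProgExc field g st i0 j0 →
      (ShapeOf field (ds.foldl (bStep (field.length : Int) (((WG field : Nat) : Int)) ((i0 : Int)) ((j0 : Int))) (g, st)).1 ∧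
       InvG field (ds.foldl (bStep (field.length : Int) (((WG field : Nat) : Int)) ((i0 : Int)) ((j0 : Int))) (g, st)).1 ∧
       StackOK (ds.foldl (bStep (field.length : Int) (((WG field : Nat) : Int)) ((i0 : Int)) ((j0 : Int))) (g, st)).1
         (ds.foldl (bStep (field.length : Int) (((WG field : Nat) : Int)) ((i0 : Int)) ((j0 : Int))) (g, st)).2 ∧
       ProgExc field (ds.foldl (bStep (field.length : Int) (((WG field : Nat) : Int)) ((i0 : Int)) ((j0 : Int))) (g, st)).1
         (ds.foldl (bStep (field.length : Int) (((WG field : Nat) : Int)) ((i0 : Int)) ((j0 : Int))) (g, st)).2 i0 j0) ∧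
      (∀ a b : Nat, cellG (ds.foldl (bStep (field.length : Int) (((WG field : Nat) : Int)) ((i0 : Int)) ((j0 : Int))) (g, st)).1 a b = some "." →
        cellG g a b = some ".") ∧
      (∀ d ∈ ds, (0 ≤ (i0 : Int) + d.1 ∧ (i0 : Int) + d.1 < (field.length : Int) ∧
          0 ≤ (j0 : Int) + d.2 ∧ (j0 : Int) + d.2 < ((WG field : Nat) : Int)) →
        cellG (ds.foldl (bStep (field.length : Int) (((WG field : Nat) : Int)) ((i0 : Int)) ((j0 : Int))) (g, st)).1
          ((i0 : Int) + d.1).toNat ((j0 : Int) + d.2).toNat ≠ some ".") := by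
  intro ds
  induction ds with
  | nil =>
    intro _ g st h1 h2 h3 h4 h5
    exact ⟨⟨h1, h2, h3, h5⟩, fun a b hab => hab, by simp⟩
  | cons d t ih =>
    intro hds g st h1 h2 h3 h4 h5
    have hd : (d.1 = -1 ∨ d.1 = 1) ∧ (d.2 = -1 ∨ d.2 = 1) := hds d (by simp)
    have hstep := bStep_inv field i0 j0 d hd g st h1 h2 h3 h4 h5
    obtain ⟨⟨s1, s2, s3, s4, s5⟩, santi, ssup, spost⟩ := hstep
    rw [List.foldl_cons]
    have iht := ih (fun d' hd' => hds d' (by simp [hd'])) _ _ s1 s2 s3 s4 s5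
    obtain ⟨⟨r1, r2, r3, r4⟩, ranti, rpost⟩ := iht
    refine ⟨⟨r1, r2, r3, r4⟩, ?_, ?_⟩
    · intro a b hab
      exact santi a b (ranti a b hab)
    · intro d' hd' hrange
      rcases List.mem_cons.mp hd' with rfl | hd''
      · intro hdot
        exact spost hrange (ranti _ _ hdot)
      · exact rpost d' hd'' hrange

theorem goodB_pop (field g : List (List String)) (i j : Int) (rest : List (Int × Int))
    (hGB : GoodB field g ((i, j) :: rest)) :
    GoodB field
      (([((-1 : Int), (-1 : Int)), (-1, 1), (1, -1), (1, 1)]).foldl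
        (bStep (field.length : Int) ((WG field : Nat) : Int) i j) (g, rest)).1
      (([((-1 : Int), (-1 : Int)), (-1, 1), (1, -1), (1, 1)]).foldl
        (bStep (field.length : Int) ((WG field : Nat) : Int) i j) (g, rest)).2 := by
  obtain ⟨hsh, hinv, hstk, hprog⟩ := hGB
  obtain ⟨i0, j0, hij, hO⟩ := hstk ((i, j)) (by simp)
  have hi : i = (i0 : Int) := (Prod.ext_iff.mp hij).1
  have hj : j = (j0 : Int) := (Prod.ext_iff.mp hij).2
  subst hi; subst hj
  have hstk' : StackOK g rest := fun q hq => hstk q (List.mem_cons.mpr (Or.inr hq))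
  have hpe : ProgExc field g rest i0 j0 := by
    intro a b hab
    rcases hprog a b hab with h1 | h1
    · rcases List.mem_cons.mp h1 with heq | h1'
      · have := Prod.ext_iff.mp heq
        simp at this
        exact Or.inr (Or.inl ⟨by exact_mod_cast this.1, by exact_mod_cast this.2⟩)
      · exact Or.inl h1'
    · exact Or.inr (Or.inr h1)
  have hfold := bfold_inv field i0 j0 [((-1 : Int), (-1 : Int)), (-1, 1), (1, -1), (1, 1)]
    (by intro d hd; fin_cases hd <;> simp) g rest hsh hinv hstk' hO hpe
  obtain ⟨⟨r1, r2, r3, r4⟩, ranti, rpost⟩ := hfold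
  have hproc : ProcessedAt field
      (([((-1 : Int), (-1 : Int)), (-1, 1), (1, -1), (1, 1)]).foldl
        (bStep (field.length : Int) ((WG field : Nat) : Int) (i0 : Int) (j0 : Int)) (g, rest)).1 i0 j0 := by
    intro a' b' hadj' hW' hdot'
    unfold Adj at hadj'
    have ha'lt : a' < field.length := by
      have := lt_of_cellG_some _ a' b' "." hdot'
      rwa [length_of_shape field _ r1] at this
    have hd : ((a' : Int) - (i0 : Int), (b' : Int) - (j0 : Int)) ∈
        ([((-1 : Int), (-1 : Int)), (-1, 1), (1, -1), (1, 1)] : List (Int × Int)) := by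
      simp [Prod.ext_iff]
      omega
    have := rpost _ hd ⟨by omega, by omega, by omega, by omega⟩
    have heqa : ((i0 : Int) + ((a' : Int) - (i0 : Int))).toNat = a' := by omega
    have heqb : ((j0 : Int) + ((b' : Int) - (j0 : Int))).toNat = b' := by omega
    rw [heqa, heqb] at this
    exact this hdot'
  refine ⟨r1, r2, r3, ?_⟩
  intro a b hab
  rcases r4 a b hab with h1 | h1 | h1
  · exact Or.inl h1
  · obtain ⟨rfl, rfl⟩ := h1
    exact Or.inr hproc
  · exact Or.inr h1

theorem bfsLoop_props (field : List (List String)) :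
    ∀ (fuel : Nat) (g : List (List String)) (st : List (Int × Int)), GoodB field g st →
      dotsG g + st.length ≤ fuel →
      ShapeOf field (bfsLoop fuel (field.length : Int) ((WG field : Nat) : Int) g st) ∧
      InvG field (bfsLoop fuel (field.length : Int) ((WG field : Nat) : Int) g st) ∧
      ClosedG field (bfsLoop fuel (field.length : Int) ((WG field : Nat) : Int) g st) := by
  have hnil : ∀ (fuel : Nat) (g : List (List String)), GoodB field g [] →
      ShapeOf field g ∧ InvG field g ∧ ClosedG field g := by
    intro _ g hGB
    refine ⟨hGB.1, hGB.2.1, ?_⟩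
    intro a b a' b' hdot hW hadj hO
    rcases hGB.2.2.2 a' b' hO with h1 | h1
    · simp at h1
    · exact h1 a b (adj_symm a b a' b' hadj) hW hdot
  intro fuel
  induction fuel with
  | zero =>
    intro g st hGB hle
    cases st with
    | nil => exact hnil 0 g hGB
    | cons p rest => simp at hle
  | succ fuel ih =>
    intro g st hGB hle
    cases st with
    | nil => exact hnil (fuel + 1) g hGB
    | cons p rest =>
      obtain ⟨i, j⟩ := p
      rw [bfsLoop]
      have hm := bfold_measure (field.length : Int) ((WG field : Nat) : Int) i j
        [((-1 : Int), (-1 : Int)), (-1, 1), (1, -1), (1, 1)] (g, rest)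
      refine ih _ _ (goodB_pop field g i j rest hGB) ?_
      simp only at hm
      simp at hle
      omega

theorem mem_foldl_step {α β : Type} (step : List β → α → List β) (Q : α → β → Prop)
    (hstep : ∀ st p x, x ∈ step st p ↔ x ∈ st ∨ Q p x) :
    ∀ (l : List α) (st : List β) (x : β),
      x ∈ l.foldl step st ↔ x ∈ st ∨ ∃ p ∈ l, Q p x := by
  intro l
  induction l with
  | nil => intro st x; simp
  | cons p t ih =>
    intro st x
    rw [List.foldl_cons, ih (step st p) x, hstep st p x, List.exists_mem_cons_iff]
    tauto

theorem mem_seedsOf (g : List (List String)) (q : Int × Int) :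
    q ∈ seedsOf g ↔ ∃ a b : Nat, q = ((a : Int), (b : Int)) ∧ cellG g a b = some "O" := by
  unfold seedsOf
  rw [mem_foldl_step _
    (fun p x => ∃ e ∈ PySem.List.enumerate p.2, e.2 = "O" ∧ x = (p.1, e.1))
    (by
      intro st p x
      rw [mem_foldl_step _ (fun e x => e.2 = "O" ∧ x = (p.1, e.1))
        (by intro st' e x; split <;> simp_all <;> tauto)]
    )]
  simp only [List.not_mem_nil, false_or]
  constructor
  · rintro ⟨p, hp, e, he, heO, rfl⟩
    rw [PySem.List.mem_enumerate_iff] at hp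
    obtain ⟨k, hk, rfl⟩ := hp
    rw [PySem.List.mem_enumerate_iff] at he
    obtain ⟨m, hm, rfl⟩ := he
    refine ⟨k, m, by simp, ?_⟩
    show (g[k]?.bind fun r => r[m]?) = some "O"
    rw [List.getElem?_eq_getElem hk]
    simp only [Option.bind_some]
    rw [List.getElem?_eq_getElem (show m < g[k].length from hm)]
    exact congrArg some (by simpa using heO)
  · rintro ⟨a, b, rfl, hab⟩
    unfold cellG at hab
    cases hga : g[a]? with
    | none => rw [hga] at hab; simp at hab
    | some r =>
      rw [hga] at hab
      simp only [Option.bind_some] at hab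
      have ha : a < g.length := (List.getElem?_eq_some_iff.mp hga).1
      have hr : g[a] = r := by
        have := List.getElem?_eq_getElem ha
        rw [hga] at this
        exact (Option.some.inj this).symm
      have hb : b < r.length := (List.getElem?_eq_some_iff.mp hab).1
      have hrb : r[b] = "O" := by
        have := List.getElem?_eq_getElem hb
        rw [hab] at this
        exact (Option.some.inj this).symm
      refine ⟨((a : Int), g[a]), ?_, ((b : Int), r[b]), ?_, ?_, ?_⟩
      · rw [PySem.List.mem_enumerate_iff]
        exact ⟨a, ha, by simp⟩
      · rw [PySem.List.mem_enumerate_iff]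
        refine ⟨b, by rw [hr]; exact hb, ?_⟩
        simp [hr]
      · simpa using hrb
      · simp

theorem fill_os_alt_props (field : List (List String)) :
    ShapeOf field (fill_os_alt field) ∧ InvG field (fill_os_alt field) ∧
    ClosedG field (fill_os_alt field) := by
  cases field with
  | nil =>
    refine ⟨rfl, fun i j => Or.inl rfl, ?_⟩
    intro a b a' b' hdot
    simp [cellG, fill_os_alt] at hdot
  | cons r0 t =>
    show ShapeOf (r0 :: t) (bfsLoop (dotsG (r0 :: t) + (seedsOf (r0 :: t)).length) ((r0 :: t).length : Int) ((r0.length : Nat) : Int) (r0 :: t) (seedsOf (r0 :: t))) ∧ _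
    have hWG : WG (r0 :: t) = r0.length := rfl
    have := bfsLoop_props (r0 :: t) (dotsG (r0 :: t) + (seedsOf (r0 :: t)).length) (r0 :: t)
      (seedsOf (r0 :: t))
      ⟨rfl, fun _ _ => Or.inl rfl,
        fun q hq => (mem_seedsOf (r0 :: t) q).mp hq,
        fun a b hab => Or.inl ((mem_seedsOf (r0 :: t) ((a : Int), (b : Int))).mpr ⟨a, b, rfl, hab⟩)⟩
      (le_refl _)
    rw [hWG] at this
    exact this

-- ===== VERDICT (by name: the statement is the Claim_ definition above) =====
theorem fill_os_spec : Claim_equal_fill_os := by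
  intro field _ _
  unfold Spec_fill_os
  have hA := fill_os_props field
  have hB := fill_os_alt_props field
  exact final_eq field (fill_os field) (fill_os_alt field)
    hA.1.1 hB.1 hA.1.2 hB.2.1 hA.2 hB.2.2
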